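-- pv_equiv track=rewrite | github.com/MartinTous/IA2 | TP1/DistanciasTotales/main.py | almacen
-- ===== SOURCE A (Python) =====
-- def almacen(matriz,dim):
--     PF=0             #Pasillo filas
--     PC=0             #Pasillos columnas
--     estante=0
--     for i in range(0,dim):
--         matriz.append([0]*dim)
--
--     for i in range(0,dim):
--         for j in range(0,dim):
--             if PF==0:
--                 matriz[i][j]=0
--             elif PC==0:
--                 matriz[i][j]=0
--             else:
--                 estante=estante+1
--                 matriz[i][j]=estante
--             PC=PC+1
--             if PC==3:
--                 PC=0
--         PF=PF+1
--         PC=0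
--         if PF==5:
--             PF=0
--     return matriz,estante
-- ===== SOURCE B (Python) =====
-- def almacen(matriz, dim):
--     # Same in-place mutation as the original: extends matriz with dim new rows
--     # and overwrites the first dim entries of the first dim rows.
--     cols = [j for j in range(dim) if j % 3 != 0]
--     spr = len(cols)
--     rows_valid = sum(1 for i in range(dim) if i % 5 != 0)
--     for _ in range(dim):
--         matriz.append([0] * dim)
--     vr = 0
--     for i in range(dim):
--         if i % 5 == 0:
--             row = [0] * dim
--         else:
--             row = [0] * dim
--             base = vr * spr
--             for m, j in enumerate(cols):
--                 row[j] = base + m + 1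
--             vr += 1
--         matriz[i][:dim] = row
--     return matriz, rows_valid * spr
-- ===== Notes on version B (the rewrite author's own statement) =====
-- stated objective: alternative
-- what changed: Replaces the stateful PF/PC/estante nested accumulator with per-row closed-form numbering: valid columns are precomputed once, each non-aisle row is filled as base+m+1 from an enumerate over them, and the returned count is rows_valid*shelves_per_row instead of a running counter.
import Mathlib
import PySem

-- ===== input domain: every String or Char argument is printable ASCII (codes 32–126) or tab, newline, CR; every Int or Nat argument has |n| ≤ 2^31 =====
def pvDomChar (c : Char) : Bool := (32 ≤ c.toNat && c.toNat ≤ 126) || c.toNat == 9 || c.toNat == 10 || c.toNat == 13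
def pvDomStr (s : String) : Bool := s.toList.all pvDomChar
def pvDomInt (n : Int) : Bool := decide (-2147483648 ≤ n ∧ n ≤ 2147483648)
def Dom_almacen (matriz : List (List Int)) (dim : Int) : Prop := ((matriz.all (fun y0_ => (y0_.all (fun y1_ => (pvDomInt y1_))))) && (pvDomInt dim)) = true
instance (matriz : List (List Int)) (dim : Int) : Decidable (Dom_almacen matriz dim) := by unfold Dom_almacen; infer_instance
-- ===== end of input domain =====

-- B replaces A's stateful PF/PC/estante nested accumulator by closed-form per-row numbering
-- (objective: alternative). Both Pythons mutate `matriz` in place in the same way; the ports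
-- and the equivalence are about the returned (matrix, count) value.

-- ===== PORT A =====
-- matriz[i][j] = v  (exact for the nonnegative in-range indices reached under Pre_)
def pySet2 (mat : List (List Int)) (i j : Int) (v : Int) : List (List Int) :=
  match mat[i.toNat]? with
  | some row => mat.set i.toNat (row.set j.toNat v)
  | none => mat

-- body of A's inner `for j` loop; state = (matriz, PF, PC, estante)
def bodyA_inner (i : Int) (s : List (List Int) × Int × Int × Int) (j : Int) :
    List (List Int) × Int × Int × Int :=
  let mat := s.1; let PF := s.2.1; let PC := s.2.2.1; let est := s.2.2.2
  let (mat, est) :=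
    if PF = 0 then (pySet2 mat i j 0, est)
    else if PC = 0 then (pySet2 mat i j 0, est)
    else (pySet2 mat i j (est + 1), est + 1)
  let PC := PC + 1
  let PC := if PC = 3 then 0 else PC
  (mat, PF, PC, est)

-- body of A's outer `for i` loop
def bodyA_outer (dim : Int) (s : List (List Int) × Int × Int × Int) (i : Int) :
    List (List Int) × Int × Int × Int :=
  let s := (PySem.List.pyRange 0 dim 1).foldl (bodyA_inner i) s
  let PF := s.2.1 + 1
  let PF := if PF = 5 then 0 else PF
  (s.1, PF, 0, s.2.2.2)

def almacen (matriz : List (List Int)) (dim : Int) : List (List Int) × Int :=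
  let mat := (PySem.List.pyRange 0 dim 1).foldl
    (fun m _ => m ++ [List.replicate dim.toNat 0]) matriz
  let s := (PySem.List.pyRange 0 dim 1).foldl (bodyA_outer dim) (mat, 0, 0, 0)
  (s.1, s.2.2.2)

-- ===== PORT B =====
-- matriz[i][:dim] = row  (Python list slice assignment, len(row) = dim, 0 ≤ i < len(mat))
def sliceAssign (mat : List (List Int)) (i n : Nat) (row : List Int) : List (List Int) :=
  match mat[i]? with
  | some orig => mat.set i (row ++ orig.drop n)
  | none => mat

-- body of B's `for i` loop; state = (matriz, vr)
def bodyB (dim : Int) (cols : List Int) (spr : Int) (s : List (List Int) × Int) (i : Int) :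
    List (List Int) × Int :=
  if i % 5 = 0 then (sliceAssign s.1 i.toNat dim.toNat (List.replicate dim.toNat 0), s.2)
  else
    let base := s.2 * spr
    let row := (PySem.List.enumerate cols 0).foldl
      (fun r p => r.set p.2.toNat (base + p.1 + 1)) (List.replicate dim.toNat 0)
    (sliceAssign s.1 i.toNat dim.toNat row, s.2 + 1)

def almacen_alt (matriz : List (List Int)) (dim : Int) : List (List Int) × Int :=
  let cols := (PySem.List.pyRange 0 dim 1).filter (fun j => j % 3 != 0)
  let spr : Int := cols.length
  let rowsValid : Int := ((PySem.List.pyRange 0 dim 1).filter (fun i => i % 5 != 0)).length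
  let mat := (PySem.List.pyRange 0 dim 1).foldl
    (fun m _ => m ++ [List.replicate dim.toNat 0]) matriz
  let s := (PySem.List.pyRange 0 dim 1).foldl (bodyB dim cols spr) (mat, 0)
  (s.1, rowsValid * spr)

-- ===== PRECONDITION & SPEC =====
-- Pre_ excludes exactly the inputs on which A raises IndexError: a pre-existing row among the
-- first dim rows of matriz that is shorter than dim (A writes matriz[i][j] for j < dim there).
def Pre_almacen (matriz : List (List Int)) (dim : Int) : Prop :=
  ∀ row ∈ matriz.take dim.toNat, dim ≤ (row.length : Int)
instance (matriz : List (List Int)) (dim : Int) : Decidable (Pre_almacen matriz dim) := by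
  unfold Pre_almacen; infer_instance
def pvWitness_almacen : List (List Int) × Int := ([[1, 2]], 2)

def Spec_almacen (matriz : List (List Int)) (dim : Int) (out : List (List Int) × Int) : Prop := out = almacen_alt matriz dim
instance (matriz : List (List Int)) (dim : Int) (out : List (List Int) × Int) : Decidable (Spec_almacen matriz dim out) := by unfold Spec_almacen; infer_instance

-- ===== CLAIM (what is proved, stated in full; the proofs are below) =====
def Claim_equal_almacen : Prop := ∀ (matriz : List (List Int)) (dim : Int), Dom_almacen matriz dim → Pre_almacen matriz dim → Spec_almacen matriz dim (almacen matriz dim)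

-- ===== LEMMAS AND PROOFS =====

-- Nat-level reference quantities
def jl (n : Nat) : List Int := (List.range n).map (fun (k : Nat) => (k : Int))
def c3 (n : Nat) : Nat := (List.range n).countP (fun j => j % 3 != 0)
def v5 (n : Nat) : Nat := (List.range n).countP (fun i => i % 5 != 0)
def vfun (N i j : Nat) : Int :=
  if i % 5 = 0 ∨ j % 3 = 0 then 0 else (v5 i : Int) * (c3 N : Int) + (c3 j : Int) + 1
def patRow (N i : Nat) : List Int := (List.range N).map (vfun N i)
def m1 (matriz : List (List Int)) (N : Nat) : List (List Int) :=
  matriz ++ List.replicate N (List.replicate N (0 : Int))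
def matAt (matriz : List (List Int)) (N i : Nat) : List (List Int) :=
  (List.range i).foldl
    (fun m k => m.set k (patRow N k ++ (((m1 matriz N)[k]?).getD []).drop N))
    (m1 matriz N)
def cellV (PF est : Int) (j : Nat) : Int :=
  if PF = 0 ∨ j % 3 = 0 then 0 else est + (c3 j : Int) + 1

theorem pyRange_jl (dim : Int) : PySem.List.pyRange 0 dim 1 = jl dim.toNat := by
  rw [PySem.List.pyRange_one]
  simp only [zero_add, sub_zero]
  rfl

theorem append_fold {α β : Type} (xs : List α) (z : β) (m : List β) :
    xs.foldl (fun m _ => m ++ [z]) m = m ++ List.replicate xs.length z := by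
  induction xs generalizing m with
  | nil => simp
  | cons x xs ih => simp [List.foldl_cons, ih, List.replicate_succ]

theorem c3_succ (n : Nat) : c3 (n + 1) = c3 n + (if n % 3 = 0 then 0 else 1) := by
  simp [c3, List.range_succ, List.countP_append]

theorem v5_succ (n : Nat) : v5 (n + 1) = v5 n + (if n % 5 = 0 then 0 else 1) := by
  simp [v5, List.range_succ, List.countP_append]

theorem colsI_length (N : Nat) : ((jl N).filter (fun j => j % 3 != 0)).length = c3 N := by
  simp only [jl, List.filter_map, List.length_map, ← List.countP_eq_length_filter, c3]
  apply List.countP_congr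
  intro k _
  simp only [Function.comp_apply, bne_iff_ne, ne_eq]
  constructor <;> intro h <;> omega

theorem rowsValid_length (N : Nat) : ((jl N).filter (fun i => i % 5 != 0)).length = v5 N := by
  simp only [jl, List.filter_map, List.length_map, ← List.countP_eq_length_filter, v5]
  apply List.countP_congr
  intro k _
  simp only [Function.comp_apply, bne_iff_ne, ne_eq]
  constructor <;> intro h <;> omega

theorem jl_succ (n : Nat) : jl (n + 1) = jl n ++ [(n : Int)] := by
  simp [jl, List.range_succ]

theorem inner_spec (N : Nat) (i PF est : Int) (mat : List (List Int)) :
    (jl N).foldl (bodyA_inner i) (mat, PF, 0, est) =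
      ((List.range N).foldl (fun m (j : Nat) => pySet2 m i (j : Int) (cellV PF est j)) mat,
        PF, ((N % 3 : Nat) : Int), est + (if PF = 0 then 0 else (c3 N : Int))) := by
  induction N with
  | zero =>
    simp [jl, c3]
  | succ n ih =>
    rw [jl_succ, List.foldl_append, List.foldl_cons, List.foldl_nil, ih,
      List.range_succ, List.foldl_append, List.foldl_cons, List.foldl_nil]
    simp only [bodyA_inner, cellV, c3_succ n]
    by_cases hPF : PF = 0 <;> by_cases h3 : n % 3 = 0 <;>
      simp [hPF, h3]
    · omega
    · split_ifs <;> omega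
    · omega
    · have hd : ¬ (3 : Int) ∣ (n : Int) := by omega
      simp [hd]
      split_ifs <;> omega

theorem write_row (N : Nat) (i : Nat) (v : Nat → Int) :
    ∀ (mat : List (List Int)) (row : List Int), mat[i]? = some row →
    (List.range N).foldl (fun m (j : Nat) => pySet2 m (i : Int) (j : Int) (v j)) mat =
      mat.set i ((List.range N).foldl (fun r j => r.set j (v j)) row) := by
  intro mat row h
  obtain ⟨hi, hrow⟩ := List.getElem?_eq_some_iff.mp h
  have hset : ∀ (X : List Int), (mat.set i X)[i]? = some X := fun X => by simp [hi]
  induction N with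
  | zero => simp [← hrow, List.set_getElem_self]
  | succ n ih =>
    rw [List.range_succ, List.foldl_append, List.foldl_cons, List.foldl_nil, ih]
    show pySet2 _ (i : Int) (n : Int) (v n) = _
    unfold pySet2
    simp only [Int.toNat_natCast]
    rw [hset]
    simp [List.set_set]

theorem fold_set_append (f : Int × Int → Int) :
    ∀ (P : List (Int × Int)) (r t : List Int), (∀ p ∈ P, p.2.toNat < r.length) →
    P.foldl (fun r p => r.set p.2.toNat (f p)) (r ++ t) =
      (P.foldl (fun r p => r.set p.2.toNat (f p)) r) ++ t := by
  intro P
  induction P with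
  | nil => intro r t _; rfl
  | cons p P ih =>
    intro r t h
    rw [List.foldl_cons, List.foldl_cons,
      List.set_append_left _ _ (h p (by simp)),
      ih _ t (by intro q hq; rw [List.length_set]; exact h q (by simp [hq]))]

theorem enum_snd_lt (n : Nat) :
    ∀ p ∈ PySem.List.enumerate ((jl n).filter (fun j => j % 3 != 0)) 0, p.2.toNat < n := by
  intro p hp
  have h2 : p.2 ∈ (jl n).filter (fun j => j % 3 != 0) := by
    have hm := PySem.List.map_snd_enumerate ((jl n).filter (fun j => j % 3 != 0)) 0
    exact hm ▸ List.mem_map_of_mem hp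
  have h4 : p.2 ∈ jl n := List.mem_of_mem_filter h2
  simp only [jl, List.mem_map, List.mem_range] at h4
  obtain ⟨k, hk, hke⟩ := h4
  omega

theorem rowB_eq (N : Nat) (base : Int) :
    (PySem.List.enumerate ((jl N).filter (fun j => j % 3 != 0)) 0).foldl
        (fun r p => r.set p.2.toNat (base + p.1 + 1)) (List.replicate N 0) =
      (List.range N).map (fun j => if j % 3 = 0 then 0 else base + (c3 j : Int) + 1) := by
  induction N with
  | zero => simp [jl]
  | succ n ih =>
    rw [jl_succ, List.filter_append, List.replicate_succ', List.range_succ, List.map_append]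
    by_cases h3 : n % 3 = 0
    · have hf : List.filter (fun j => j % 3 != 0) [(n : Int)] = [] := by
        simp only [List.filter]
        have : ((n : Int) % 3 != 0) = false := by simp; omega
        rw [this]
      rw [hf, List.append_nil, fold_set_append _ _ _ _ (by simpa using enum_snd_lt n), ih]
      simp [h3]
    · have hf : List.filter (fun j => j % 3 != 0) [(n : Int)] = [(n : Int)] := by
        simp only [List.filter]
        have : ((n : Int) % 3 != 0) = true := by simp; omega
        rw [this]
      rw [hf, PySem.List.enumerate_append, List.foldl_append,
        fold_set_append _ _ _ _ (by simpa using enum_snd_lt n), ih,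
        PySem.List.enumerate_cons, PySem.List.enumerate_nil, List.foldl_cons, List.foldl_nil,
        colsI_length, List.set_append_right _ _ (by simp)]
      simp [h3]

theorem matAt_get_ge (matriz : List (List Int)) (N : Nat) :
    ∀ i k, i ≤ k → (matAt matriz N i)[k]? = (m1 matriz N)[k]? := by
  intro i
  induction i with
  | zero => intro k _; rfl
  | succ n ih =>
    intro k hk
    have : matAt matriz N (n + 1) =
        (matAt matriz N n).set n (patRow N n ++ (((m1 matriz N)[n]?).getD []).drop N) := by
      simp [matAt, List.range_succ]
    rw [this, List.getElem?_set_ne (by omega), ih k (by omega)]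

theorem m1_row (matriz : List (List Int)) (dim : Int) (hpre : Pre_almacen matriz dim)
    (i : Nat) (hi : i < dim.toNat) :
    ∃ row, (m1 matriz dim.toNat)[i]? = some row ∧ dim.toNat ≤ row.length := by
  by_cases hlt : i < matriz.length
  · refine ⟨matriz[i], ?_, ?_⟩
    · simp [m1, List.getElem?_append_left hlt, hlt]
    · have hmem : matriz[i] ∈ matriz.take dim.toNat :=
        List.mem_take_iff_getElem.mpr ⟨i, by omega, by simp⟩
      have := hpre _ hmem
      omega
  · refine ⟨List.replicate dim.toNat 0, ?_, by simp⟩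
    have h2 : i - matriz.length < dim.toNat := by omega
    simp [m1, List.getElem?_append_right (by omega : matriz.length ≤ i),
      h2]

theorem wr_eq (N : Nat) (row : List Int) (v : Nat → Int) (h : N ≤ row.length) :
    (List.range N).foldl (fun r j => r.set j (v j)) row =
      (List.range N).map v ++ row.drop N := by
  induction N with
  | zero => simp
  | succ n ih =>
    rw [List.range_succ, List.foldl_append, List.foldl_cons, List.foldl_nil,
      ih (by omega), List.set_append_right _ _ (by simp)]
    simp only [List.length_map, List.length_range, Nat.sub_self,
      List.drop_eq_getElem_cons (show n < row.length by omega), List.set_cons_zero,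
      List.map_append, List.map_cons, List.map_nil, List.append_assoc, List.singleton_append]

theorem outer_A (matriz : List (List Int)) (dim : Int) (hpre : Pre_almacen matriz dim) :
    ∀ i, i ≤ dim.toNat →
    (jl i).foldl (bodyA_outer dim) (m1 matriz dim.toNat, 0, 0, 0) =
      (matAt matriz dim.toNat i, ((i % 5 : Nat) : Int), 0,
        (v5 i : Int) * (c3 dim.toNat : Int)) := by
  intro i
  induction i with
  | zero => intro _; simp [matAt, v5, jl]
  | succ n ihn =>
    intro hn1
    rw [jl_succ, List.foldl_append, List.foldl_cons, List.foldl_nil, ihn (by omega)]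
    unfold bodyA_outer
    rw [pyRange_jl, inner_spec]
    obtain ⟨row, hrow, hlen⟩ := m1_row matriz dim hpre n (by omega)
    have hget : (matAt matriz dim.toNat n)[n]? = some row := by
      rw [matAt_get_ge matriz dim.toNat n n (le_refl n)]; exact hrow
    rw [write_row _ _ _ _ _ hget, wr_eq _ _ _ hlen]
    have hcell : (List.range dim.toNat).map
        (cellV ((n : Int) % 5) ((v5 n : Int) * (c3 dim.toNat : Int))) =
        patRow dim.toNat n := by
      unfold patRow
      apply List.map_congr_left
      intro j _
      unfold cellV vfun
      have hc : (n : Int) % 5 = 0 ↔ n % 5 = 0 := by omega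
      rw [if_congr (or_congr hc Iff.rfl) rfl rfl]
    have hAt : matAt matriz dim.toNat (n + 1) =
        (matAt matriz dim.toNat n).set n
          (patRow dim.toNat n ++ (((m1 matriz dim.toNat)[n]?).getD []).drop dim.toNat) := by
      simp [matAt, List.range_succ]
    have hPF5 : (if (n : Int) % 5 + 1 = 5 then 0 else (n : Int) % 5 + 1) =
        ((n : Int) + 1) % 5 := by split_ifs <;> omega
    have hest : (v5 n : Int) * (c3 dim.toNat : Int) +
        (if (5 : Int) ∣ (n : Int) then 0 else (c3 dim.toNat : Int)) =
        (v5 (n + 1) : Int) * (c3 dim.toNat : Int) := by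
      rw [v5_succ]
      have hd : (5 : Int) ∣ (n : Int) ↔ n % 5 = 0 := by omega
      by_cases h5 : n % 5 = 0
      · simp [h5, hd.mpr h5]
      · rw [if_neg (by rw [hd]; exact h5), if_neg h5]
        push_cast
        ring
    rw [hAt, hrow]
    simp [hcell, hPF5, hest]

theorem outer_B (matriz : List (List Int)) (dim : Int) (hpre : Pre_almacen matriz dim) :
    ∀ i, i ≤ dim.toNat →
    (jl i).foldl (bodyB dim ((jl dim.toNat).filter (fun j => j % 3 != 0)) (c3 dim.toNat : Int))
        (m1 matriz dim.toNat, 0) =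
      (matAt matriz dim.toNat i, (v5 i : Int)) := by
  intro i
  induction i with
  | zero => intro _; simp [matAt, v5, jl]
  | succ n ihn =>
    intro hn1
    rw [jl_succ, List.foldl_append, List.foldl_cons, List.foldl_nil, ihn (by omega)]
    unfold bodyB
    obtain ⟨row, hrow, hlen⟩ := m1_row matriz dim hpre n (by omega)
    have hget : (matAt matriz dim.toNat n)[n]? = some row := by
      rw [matAt_get_ge matriz dim.toNat n n (le_refl n)]; exact hrow
    have hAt : matAt matriz dim.toNat (n + 1) =
        (matAt matriz dim.toNat n).set n
          (patRow dim.toNat n ++ (((m1 matriz dim.toNat)[n]?).getD []).drop dim.toNat) := by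
      simp [matAt, List.range_succ]
    have hslice : ∀ r : List Int,
        sliceAssign (matAt matriz dim.toNat n) (Int.toNat (n : Int)) dim.toNat r =
          (matAt matriz dim.toNat n).set n (r ++ row.drop dim.toNat) := by
      intro r
      unfold sliceAssign
      simp only [Int.toNat_natCast]
      rw [hget]
    by_cases h5 : n % 5 = 0
    · rw [if_pos (by omega : (n : Int) % 5 = 0), hslice, hAt, hrow]
      have hrep : List.replicate dim.toNat (0 : Int) = patRow dim.toNat n := by
        unfold patRow vfun
        simp [h5, List.map_const']
      rw [hrep]
      simp [v5_succ, h5]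
    · rw [if_neg (by omega : ¬ (n : Int) % 5 = 0)]
      simp only []
      rw [rowB_eq, hslice, hAt, hrow]
      have hpat : (List.range dim.toNat).map
          (fun j => if j % 3 = 0 then 0 else (v5 n : Int) * (c3 dim.toNat : Int) + (c3 j : Int) + 1) =
          patRow dim.toNat n := by
        unfold patRow vfun
        apply List.map_congr_left
        intro j _
        by_cases hj : j % 3 = 0 <;> simp [hj, h5]
      rw [hpat]
      simp [v5_succ, h5]

-- ===== VERDICT (by name: the statement is the Claim_ definition above) =====
theorem almacen_spec : Claim_equal_almacen := by
  intro matriz dim _ hpre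
  unfold Spec_almacen almacen almacen_alt
  have hm1 : (jl dim.toNat).foldl (fun m _ => m ++ [List.replicate dim.toNat (0 : Int)]) matriz =
      m1 matriz dim.toNat := by
    rw [append_fold]
    simp [jl, m1]
  have hA := outer_A matriz dim hpre dim.toNat (le_refl _)
  have hB := outer_B matriz dim hpre dim.toNat (le_refl _)
  simp only [pyRange_jl, hm1, colsI_length, rowsValid_length, hA, hB]
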